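-- pv_equiv track=rewrite | github.com/candidoregis/AIDI1003-CAPSTONE | backend/ml_model/resume/resume_processor.py | _personalize_skills
-- ===== SOURCE A (Python) =====
-- def _personalize_skills(skills_content, job_skills):
--     """
--     Personalize the skills section based on job skills.
--
--     Args:
--         skills_content (str): Original skills content
--         job_skills (list): List of job skills
--
--     Returns:
--         str: Personalized skills content
--     """
--     # Handle case where skills_content is empty or not a string
--     if not skills_content or not isinstance(skills_content, str):
--         # If we have job skills, use them as the skills content
--         if job_skills and len(job_skills) > 0:
--             return ', '.join(job_skills)
--         return "No skills available"
--
--     # Check if skills_content is already in a comma-separated format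
--     if ',' in skills_content:
--         # Extract individual skills from the skills content
--         resume_skills = [skill.strip() for skill in skills_content.split(',')]
--     else:
--         # Try to extract skills by splitting on newlines and other delimiters
--         resume_skills = []
--         for line in skills_content.split('\n'):
--             line = line.strip()
--             if not line:
--                 continue
--
--             # Check if line contains multiple skills
--             if ',' in line:
--                 resume_skills.extend([s.strip() for s in line.split(',')])
--             elif ';' in line:
--                 resume_skills.extend([s.strip() for s in line.split(';')])
--             elif '•' in line:
--                 resume_skills.extend([s.strip() for s in line.split('•') if s.strip()])
--             elif '-' in line:
--                 resume_skills.extend([s.strip() for s in line.split('-') if s.strip()])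
--             else:
--                 # Assume the whole line is a skill
--                 resume_skills.append(line)
--
--     # Remove empty skills
--     resume_skills = [skill for skill in resume_skills if skill]
--
--     # If no skills were extracted, use the original content
--     if not resume_skills:
--         # If we have job skills, use them as the skills content
--         if job_skills and len(job_skills) > 0:
--             return ', '.join(job_skills)
--         return skills_content
--
--     # Prioritize skills that match the job description
--     matched_skills = []
--     for skill in resume_skills:
--         for job_skill in job_skills:
--             if job_skill.lower() in skill.lower() or skill.lower() in job_skill.lower():
--                 matched_skills.append(skill)
--                 break
--
--     # Get skills that didn't match
--     other_skills = [skill for skill in resume_skills if skill not in matched_skills]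
--
--     # Combine the skills with matched skills first
--     personalized_skills = matched_skills + other_skills
--
--     # Return as a comma-separated list
--     return ', '.join(personalized_skills)
-- ===== SOURCE B (Python) =====
-- def _personalize_skills(skills_content, job_skills):
--     # B: parsing unified into one delimiter-picking helper producing already-clean
--     # skills, and the matched-first reordering done by a single stable sort on a
--     # boolean key (Python's sort is stable, so relative order is preserved),
--     # instead of A's two-list build plus quadratic membership re-scan.
--     if not skills_content or not isinstance(skills_content, str):
--         return ', '.join(job_skills) if job_skills else "No skills available"
--
--     def clean(parts):
--         return [p.strip() for p in parts if p.strip()]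
--
--     def pieces(text):
--         # text arrives already stripped
--         for sep in (',', ';', '•', '-'):
--             if sep in text:
--                 return clean(text.split(sep))
--         return [text] if text else []
--
--     if ',' in skills_content:
--         skills = clean(skills_content.split(','))
--     else:
--         skills = [s for line in skills_content.split('\n') for s in pieces(line.strip())]
--
--     if not skills:
--         return ', '.join(job_skills) if job_skills else skills_content
--
--     lowered = [j.lower() for j in job_skills]
--
--     def matched(skill):
--         low = skill.lower()
--         return any(j in low or low in j for j in lowered)
--
--     return ', '.join(sorted(skills, key=lambda s: not matched(s)))
-- ===== Notes on version B (the rewrite author's own statement) =====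
-- stated objective: alternative
-- what changed: A's five-branch per-line elif parsing plus a global empty-filter pass is replaced by one delimiter-picking helper that yields already-clean skills, and A's final three passes (build matched_skills by a loop, quadratic 'skill not in matched_skills' re-scan, concatenate) are replaced by a single stable sort on a boolean 'not matched' key with the job skills lowered once up front.
import Mathlib
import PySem

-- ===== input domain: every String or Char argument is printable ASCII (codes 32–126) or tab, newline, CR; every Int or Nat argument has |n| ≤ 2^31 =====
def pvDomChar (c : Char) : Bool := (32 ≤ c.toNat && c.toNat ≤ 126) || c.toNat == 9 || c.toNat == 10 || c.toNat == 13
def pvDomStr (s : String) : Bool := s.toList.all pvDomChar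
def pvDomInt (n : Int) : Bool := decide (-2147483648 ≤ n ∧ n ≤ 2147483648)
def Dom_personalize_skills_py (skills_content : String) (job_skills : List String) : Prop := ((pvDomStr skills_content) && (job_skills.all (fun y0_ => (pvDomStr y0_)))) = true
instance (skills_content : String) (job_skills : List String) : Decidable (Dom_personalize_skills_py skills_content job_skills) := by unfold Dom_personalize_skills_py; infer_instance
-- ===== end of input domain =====

-- B unifies A's parsing branches into one delimiter-picking helper producing already-clean
-- skills and reorders matched-first by ONE stable sort on a boolean key, replacing A's
-- two-list build plus nested membership re-scan; objective: alternative decomposition.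


-- ===== PORT A =====
-- s.split(sep) for a literal nonempty sep (the `.getD []` only totalizes; sep ≠ "" here)
def pvSplit (s sep : String) : List String := (PySem.Str.split? s sep).getD []

-- one iteration of A's line-parsing loop
def pvParseLine (acc : List String) (line0 : String) : List String :=
  let line := PySem.Str.strip line0
  if line == "" then acc
  else if PySem.Str.isIn "," line then acc ++ (pvSplit line ",").map PySem.Str.strip
  else if PySem.Str.isIn ";" line then acc ++ (pvSplit line ";").map PySem.Str.strip
  else if PySem.Str.isIn "•" line then
    acc ++ ((pvSplit line "•").filter (fun s => !(PySem.Str.strip s == ""))).map PySem.Str.strip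
  else if PySem.Str.isIn "-" line then
    acc ++ ((pvSplit line "-").filter (fun s => !(PySem.Str.strip s == ""))).map PySem.Str.strip
  else acc ++ [line]

-- the inner matching test of A's for/break loop
def pvMatches (job_skills : List String) (skill : String) : Bool :=
  job_skills.any (fun js =>
    PySem.Str.isIn (PySem.Str.lower js) (PySem.Str.lower skill) ||
    PySem.Str.isIn (PySem.Str.lower skill) (PySem.Str.lower js))

def personalize_skills_py (skills_content : String) (job_skills : List String) : String :=
  if skills_content == "" then
    (if decide (0 < job_skills.length) then PySem.Str.join ", " job_skills
     else "No skills available")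
  else
    let resume_skills :=
      (if PySem.Str.isIn "," skills_content then
        (pvSplit skills_content ",").map PySem.Str.strip
      else
        (pvSplit skills_content "\n").foldl pvParseLine []).filter (fun s => !(s == ""))
    if resume_skills == [] then
      (if decide (0 < job_skills.length) then PySem.Str.join ", " job_skills
       else skills_content)
    else
      -- A: build matched_skills, then re-scan resume_skills for `skill not in matched_skills`
      let matched_skills := resume_skills.foldl
        (fun acc skill => if pvMatches job_skills skill then acc ++ [skill] else acc) []
      let other_skills := resume_skills.filter (fun skill => !(matched_skills.contains skill))
      PySem.Str.join ", " (matched_skills ++ other_skills)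

-- ===== PORT B =====
-- Source B clean(parts) = [p.strip() for p in parts if p.strip()]
def pvClean (parts : List String) : List String :=
  (parts.filter (fun p => !(PySem.Str.strip p == ""))).map PySem.Str.strip

-- Source B pieces: the for-sep loop returning at the first delimiter present
def pvFirstSep : List String → String → Option String
  | [], _ => none
  | sep :: rest, text => if PySem.Str.isIn sep text then some sep else pvFirstSep rest text

def pvPieces (text : String) : List String :=
  match pvFirstSep [",", ";", "•", "-"] text with
  | some sep => pvClean (pvSplit text sep)
  | none => if !(text == "") then [text] else []

def personalize_skills_py_alt (skills_content : String) (job_skills : List String) : String :=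
  if skills_content == "" then
    (if !job_skills.isEmpty then PySem.Str.join ", " job_skills
     else "No skills available")
  else
    let skills :=
      if PySem.Str.isIn "," skills_content then pvClean (pvSplit skills_content ",")
      else ((pvSplit skills_content "\n").map
              (fun line => pvPieces (PySem.Str.strip line))).flatten
    if skills == [] then
      (if !job_skills.isEmpty then PySem.Str.join ", " job_skills
       else skills_content)
    else
      let lowered := job_skills.map PySem.Str.lower
      let matched := fun s =>
        let low := PySem.Str.lower s
        lowered.any (fun j => PySem.Str.isIn j low || PySem.Str.isIn low j)
      PySem.Str.join ", " (PySem.List.sorted skills (fun s => !matched s) false)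

-- ===== PRECONDITION & SPEC =====
def Spec_personalize_skills_py (skills_content : String) (job_skills : List String) (out : String) : Prop := out = personalize_skills_py_alt skills_content job_skills
instance (skills_content : String) (job_skills : List String) (out : String) : Decidable (Spec_personalize_skills_py skills_content job_skills out) := by unfold Spec_personalize_skills_py; infer_instance

-- ===== CLAIM (what is proved, stated in full; the proofs are below) =====
def Claim_equal_personalize_skills_py : Prop := ∀ (skills_content : String) (job_skills : List String), Dom_personalize_skills_py skills_content job_skills → Spec_personalize_skills_py skills_content job_skills (personalize_skills_py skills_content job_skills)

-- ===== LEMMAS AND PROOFS =====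

set_option maxHeartbeats 1000000

-- clean(parts) = map strip then drop empties
theorem pvClean_eq (parts : List String) :
    pvClean parts = (parts.map PySem.Str.strip).filter (fun s => !(s == "")) := by
  unfold pvClean
  induction parts with
  | nil => rfl
  | cons p ps ih =>
    by_cases h : PySem.Str.strip p = "" <;> simp [h, ih]

-- every element of pvClean is nonempty, so a further nonempty filter is the identity
theorem filter_pvClean (parts : List String) :
    (pvClean parts).filter (fun s => !(s == "")) = pvClean parts := by
  rw [pvClean_eq, List.filter_filter]
  exact List.filter_congr (fun x _ => by by_cases h : x = "" <;> simp [h])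

-- Source B's pieces as the same elif chain A's branches follow
theorem pvPieces_eq (t : String) : pvPieces t =
    (if PySem.Str.isIn "," t then pvClean (pvSplit t ",")
     else if PySem.Str.isIn ";" t then pvClean (pvSplit t ";")
     else if PySem.Str.isIn "•" t then pvClean (pvSplit t "•")
     else if PySem.Str.isIn "-" t then pvClean (pvSplit t "-")
     else if !(t == "") then [t] else []) := by
  unfold pvPieces
  simp only [pvFirstSep]
  split_ifs <;> rfl

-- the body of A's line loop after the initial strip, compared with Source B's pieces
theorem line_core (acc : List String) (t : String) :
    (if t == "" then acc
     else if PySem.Str.isIn "," t then acc ++ (pvSplit t ",").map PySem.Str.strip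
     else if PySem.Str.isIn ";" t then acc ++ (pvSplit t ";").map PySem.Str.strip
     else if PySem.Str.isIn "•" t then
       acc ++ ((pvSplit t "•").filter (fun s => !(PySem.Str.strip s == ""))).map PySem.Str.strip
     else if PySem.Str.isIn "-" t then
       acc ++ ((pvSplit t "-").filter (fun s => !(PySem.Str.strip s == ""))).map PySem.Str.strip
     else acc ++ [t]).filter (fun s => !(s == ""))
      = acc.filter (fun s => !(s == "")) ++ pvPieces t := by
  rw [pvPieces_eq]
  by_cases h0 : t = ""
  · subst h0
    simp
    decide
  · rw [if_neg (by simpa using h0)]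
    by_cases h1 : PySem.Str.isIn "," t = true
    · rw [if_pos h1, if_pos h1, List.filter_append, pvClean_eq]
    · rw [if_neg h1, if_neg h1]
      by_cases h2 : PySem.Str.isIn ";" t = true
      · rw [if_pos h2, if_pos h2, List.filter_append, pvClean_eq]
      · rw [if_neg h2, if_neg h2]
        by_cases h3 : PySem.Str.isIn "•" t = true
        · rw [if_pos h3, if_pos h3, List.filter_append, ← filter_pvClean, pvClean]
        · rw [if_neg h3, if_neg h3]
          by_cases h4 : PySem.Str.isIn "-" t = true
          · rw [if_pos h4, if_pos h4, List.filter_append, ← filter_pvClean, pvClean]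
          · rw [if_neg h4, if_neg h4, List.filter_append]
            simp [h0]

-- one line of A's loop, filtered, is Source B's pieces of the stripped line
theorem line_eq (acc : List String) (line0 : String) :
    (pvParseLine acc line0).filter (fun s => !(s == ""))
      = acc.filter (fun s => !(s == "")) ++ pvPieces (PySem.Str.strip line0) := by
  have h := line_core acc (PySem.Str.strip line0)
  simpa [pvParseLine] using h

-- A's whole parsing loop, filtered, is B's flatten-of-pieces
theorem parse_eq (lines : List String) (init : List String) :
    (lines.foldl pvParseLine init).filter (fun s => !(s == ""))
      = init.filter (fun s => !(s == ""))
        ++ (lines.map (fun line => pvPieces (PySem.Str.strip line))).flatten := by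
  induction lines generalizing init with
  | nil => simp
  | cons l ls ih => simp [List.foldl_cons, ih, line_eq, List.append_assoc]

-- B's precomputed lowered job list gives exactly A's match test
theorem matched_eq (job_skills : List String) (s : String) :
    ((job_skills.map PySem.Str.lower).any (fun j =>
        PySem.Str.isIn j (PySem.Str.lower s) || PySem.Str.isIn (PySem.Str.lower s) j))
      = pvMatches job_skills s := by
  unfold pvMatches
  simp [List.any_map, Function.comp_def]

-- insertBy skips a prefix it never goes before
theorem insertBy_skip (before : String → String → Bool) (x : String) (m o : List String)
    (hm : ∀ y ∈ m, before x y = false) :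
    PySem.List.insertBy before x (m ++ o) = m ++ PySem.List.insertBy before x o := by
  induction m with
  | nil => rfl
  | cons a m ih =>
    have ha := hm a (by simp)
    simp only [List.cons_append, PySem.List.insertBy, ha, Bool.false_eq_true, if_false]
    rw [ih (fun y hy => hm y (by simp [hy]))]

-- the insertion-sort fold with a two-valued key maintains a partitioned accumulator
theorem foldl_ins (p : String → Bool) (xs : List String) : ∀ (m o : List String),
    (∀ y ∈ m, p y = true) → (∀ y ∈ o, p y = false) →
    xs.foldl (fun acc x => PySem.List.insertBy (fun a b => decide ((!p a) < (!p b))) x acc) (m ++ o)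
      = (m ++ xs.filter p) ++ (o ++ xs.filter (fun s => !p s)) := by
  induction xs with
  | nil => intro m o _ _; simp
  | cons x xs ih =>
    intro m o hm ho
    by_cases hx : p x = true
    · have hstep : PySem.List.insertBy (fun a b => decide ((!p a) < (!p b))) x (m ++ o)
          = (m ++ [x]) ++ o := by
        rw [insertBy_skip _ _ _ _ (fun y hy => by simp [hx, hm y hy])]
        cases o with
        | nil => simp [PySem.List.insertBy]
        | cons h t =>
          have hh := ho h (by simp)
          simp [PySem.List.insertBy, hx, hh]
      have hm' : ∀ y ∈ m ++ [x], p y = true := by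
        intro y hy
        rcases List.mem_append.1 hy with h | h
        · exact hm y h
        · simp at h; subst h; exact hx
      rw [List.foldl_cons, hstep, ih (m ++ [x]) o hm' ho]
      simp [hx, List.append_assoc]
    · have hx' : p x = false := by simpa using hx
      have hnb : ∀ y ∈ m ++ o, (decide ((!p x) < (!p y))) = false := by
        intro y hy
        rcases List.mem_append.1 hy with h | h
        · simp [hx', hm y h, Bool.lt_iff]
        · simp [hx', ho y h]
      have hstep : PySem.List.insertBy (fun a b => decide ((!p a) < (!p b))) x (m ++ o)
          = m ++ (o ++ [x]) := by
        rw [PySem.List.insertBy_of_forall_not_before _ _ _ hnb, List.append_assoc]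
      have ho' : ∀ y ∈ o ++ [x], p y = false := by
        intro y hy
        rcases List.mem_append.1 hy with h | h
        · exact ho y h
        · simp at h; subst h; exact hx'
      rw [List.foldl_cons, hstep, ih m (o ++ [x]) hm ho']
      simp [hx', List.append_assoc]

-- the stable sort by `not matched` is: matched skills first, then the rest, orders kept
theorem sorted_bool (p : String → Bool) (xs : List String) :
    PySem.List.sorted xs (fun s => !p s) false
      = xs.filter p ++ xs.filter (fun s => !p s) := by
  rw [PySem.List.sorted_eq_foldl_insertBy]
  simpa using foldl_ins p xs [] [] (by simp) (by simp)

-- A's matched_skills fold is a filter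
theorem matched_fold (job_skills : List String) (l : List String) :
    l.foldl (fun acc skill => if pvMatches job_skills skill then acc ++ [skill] else acc) []
      = l.filter (pvMatches job_skills) := by
  simpa using PySem.List.foldl_append_if (pvMatches job_skills) id l []

-- A's membership re-scan keeps exactly the non-matching skills
theorem other_filter (p : String → Bool) (l : List String) :
    l.filter (fun skill => !((l.filter p).contains skill)) = l.filter (fun s => !(p s)) := by
  apply List.filter_congr
  intro x hx
  by_cases h : p x = true <;> simp [List.mem_filter, hx, h]

-- the final phase, on an arbitrary already-parsed skills list
theorem tail_eq (sc : String) (job_skills : List String) (L : List String) :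
    (if L == [] then
       (if !job_skills.isEmpty then PySem.Str.join ", " job_skills else sc)
     else
       PySem.Str.join ", "
         ((L.foldl (fun acc skill => if pvMatches job_skills skill then acc ++ [skill] else acc) [])
           ++ L.filter (fun skill =>
                !((L.foldl (fun acc skill =>
                    if pvMatches job_skills skill then acc ++ [skill] else acc) []).contains skill))))
      = (if L == [] then
           (if !job_skills.isEmpty then PySem.Str.join ", " job_skills else sc)
         else
           PySem.Str.join ", "
             (PySem.List.sorted L (fun s =>
               !(job_skills.map PySem.Str.lower).any (fun j =>
                 PySem.Str.isIn j (PySem.Str.lower s) || PySem.Str.isIn (PySem.Str.lower s) j)) false)) := by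
  split
  · rfl
  · have hmatch : (fun s => !(job_skills.map PySem.Str.lower).any (fun j =>
          PySem.Str.isIn j (PySem.Str.lower s) || PySem.Str.isIn (PySem.Str.lower s) j))
        = (fun s => !pvMatches job_skills s) :=
      funext (fun s => by rw [matched_eq])
    rw [matched_fold, other_filter]
    congr 1
    rw [hmatch, sorted_bool]

theorem personalize_eq (skills_content : String) (job_skills : List String) :
    personalize_skills_py skills_content job_skills
      = personalize_skills_py_alt skills_content job_skills := by
  unfold personalize_skills_py personalize_skills_py_alt
  have hjob : decide (0 < job_skills.length) = !job_skills.isEmpty := by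
    cases job_skills <;> simp
  split
  · simp [hjob]
  · dsimp only
    have hskills :
        (if PySem.Str.isIn "," skills_content then
           (pvSplit skills_content ",").map PySem.Str.strip
         else (pvSplit skills_content "\n").foldl pvParseLine []).filter (fun s => !(s == ""))
          = (if PySem.Str.isIn "," skills_content then pvClean (pvSplit skills_content ",")
             else ((pvSplit skills_content "\n").map
                     (fun line => pvPieces (PySem.Str.strip line))).flatten) := by
      split
      · rw [pvClean_eq]
      · simpa using parse_eq (pvSplit skills_content "\n") []
    rw [hskills, hjob]
    exact tail_eq skills_content job_skills _

-- ===== VERDICT (by name: the statement is the Claim_ definition above) =====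
theorem personalize_skills_py_spec : Claim_equal_personalize_skills_py := by
  intro sc js _
  exact personalize_eq sc js
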